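-- pv_equiv track=rewrite | github.com/ketchupandmustard/crimtech-comp-f21 | python/rm_smallest.py | rm_smallest
-- ===== SOURCE A (Python) =====
-- def rm_smallest(d):
--     # Your code here!
--     if d:
--         min = sorted(d.values())[0]
--         for x in d.keys():
--             if d[x] == min:
--                 del d[x]
--                 break
--     return d
-- ===== SOURCE B (Python) =====
-- def rm_smallest(d):
--     # Same mutation as A: deletes the first key with minimal value in place and returns d.
--     if d:
--         k = min(d, key=d.get)
--         del d[k]
--     return d
-- ===== Notes on version B (the rewrite author's own statement) =====
-- stated objective: simpler
-- what changed: Replaces the sort-all-values pass plus the explicit key-matching loop by a single direct argmin key selection (min(d, key=d.get)) followed by one deletion.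
import Mathlib
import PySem

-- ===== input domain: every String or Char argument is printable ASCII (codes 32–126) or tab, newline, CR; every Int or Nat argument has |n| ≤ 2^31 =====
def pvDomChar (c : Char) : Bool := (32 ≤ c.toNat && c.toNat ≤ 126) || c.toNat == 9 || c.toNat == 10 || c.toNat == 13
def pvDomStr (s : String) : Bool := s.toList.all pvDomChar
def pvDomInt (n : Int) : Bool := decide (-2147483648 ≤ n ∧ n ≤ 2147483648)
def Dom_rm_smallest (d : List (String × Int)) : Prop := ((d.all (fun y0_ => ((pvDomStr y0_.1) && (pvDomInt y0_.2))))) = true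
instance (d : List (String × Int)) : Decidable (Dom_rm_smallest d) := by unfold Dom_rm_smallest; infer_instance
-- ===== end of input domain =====

-- B replaces A's sort-of-all-values + key-matching loop by one direct argmin key selection;
-- both Pythons mutate d identically (delete the chosen key) and return it; the proof is about the returned dict.


-- ===== PORT A =====
-- 'for x in d.keys(): if d[x] == min: del d[x]; break' — scan the keys, erase the first hit and stop.
def rmA_loop (d : List (String × Int)) (m : Int) : List String → List (String × Int)
  | [] => d
  | x :: rest =>
    if List.lookup x d == some m then d.eraseP (fun p => p.1 == x)
    else rmA_loop d m rest

def rm_smallest (d : List (String × Int)) : List (String × Int) :=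
  if d.isEmpty then d
  else
    match PySem.List.sorted (d.map Prod.snd) (fun v => v) with
    | [] => d          -- unreachable: d is nonempty, so sorted(d.values()) is too ([0] would raise only here)
    | m :: _ => rmA_loop d m (d.map Prod.fst)

-- ===== PORT B =====
-- 'if d: k = min(d, key=d.get); del d[k]' — d.get never misses since every iterated key is in d.
def rm_smallest_alt (d : List (String × Int)) : List (String × Int) :=
  match PySem.List.min? (d.map Prod.fst) (fun k => (List.lookup k d).getD 0) with
  | none => d          -- min over an empty dict: the 'if d:' guard
  | some k => d.eraseP (fun p => p.1 == k)

-- ===== PRECONDITION & SPEC =====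
-- Pre_ excludes association lists with duplicate keys: a Python dict cannot contain them, so A is never run on such an input.
def Pre_rm_smallest (d : List (String × Int)) : Prop := (d.map Prod.fst).Nodup
instance (d : List (String × Int)) : Decidable (Pre_rm_smallest d) := by unfold Pre_rm_smallest; infer_instance
def pvWitness_rm_smallest : (List (String × Int)) := [("a", 2), ("b", 1), ("c", 1)]
def Spec_rm_smallest (d : List (String × Int)) (out : List (String × Int)) : Prop := out = rm_smallest_alt d
instance (d : List (String × Int)) (out : List (String × Int)) : Decidable (Spec_rm_smallest d out) := by unfold Spec_rm_smallest; infer_instance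

-- ===== CLAIM (what is proved, stated in full; the proofs are below) =====
def Claim_equal_rm_smallest : Prop := ∀ (d : List (String × Int)), Dom_rm_smallest d → Pre_rm_smallest d → Spec_rm_smallest d (rm_smallest d)

-- ===== LEMMAS AND PROOFS =====

def minStep {α : Type} (f : α → Int) (acc : Option α) (x : α) : Option α :=
  match acc with
  | none => some x
  | some c => if f x < f c then some x else some c

theorem find?_congr' {α : Type} (l : List α) (p q : α → Bool) (h : ∀ x ∈ l, p x = q x) :
    l.find? p = l.find? q := by
  induction l with
  | nil => rfl
  | cons a t ih =>
    simp only [List.find?_cons]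
    rw [h a (List.mem_cons_self)]
    cases q a with
    | true => rfl
    | false => exact ih (fun x hx => h x (List.mem_cons_of_mem _ hx))

theorem lookup_of_mem_nodup {d : List (String × Int)} {k : String} {v : Int}
    (hnd : (d.map Prod.fst).Nodup) (h : (k, v) ∈ d) : List.lookup k d = some v := by
  induction d with
  | nil => simp at h
  | cons a t ih =>
    simp only [List.map_cons, List.nodup_cons] at hnd
    rcases List.mem_cons.mp h with h | h
    · subst h; simp [List.lookup]
    · have hne : (k == a.1) = false := by
        refine beq_eq_false_iff_ne.mpr (fun he => ?_)
        have hk : k ∈ List.map Prod.fst t := List.mem_map.mpr ⟨(k, v), h, rfl⟩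
        rw [he] at hk
        exact hnd.1 hk
      simp [List.lookup, hne, ih hnd.2 h]

theorem lookup_exists_of_mem_keys {d : List (String × Int)} {k : String}
    (h : k ∈ d.map Prod.fst) : ∃ v, List.lookup k d = some v ∧ (k, v) ∈ d := by
  induction d with
  | nil => simp at h
  | cons a t ih =>
    by_cases he : k = a.1
    · refine ⟨a.2, by simp [List.lookup, he], List.mem_cons.mpr (Or.inl ?_)⟩
      simp [he]
    · have hne : (k == a.1) = false := beq_eq_false_iff_ne.mpr he
      simp only [List.map_cons] at h
      rcases List.mem_cons.mp h with h1 | h1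
      · exact absurd h1 he
      · rcases ih h1 with ⟨v, hv, hm⟩
        exact ⟨v, by simp [List.lookup, hne, hv], List.mem_cons_of_mem _ hm⟩

-- the running-min fold keeps the first element attaining the minimum
theorem foldl_min_find {α : Type} (t : List α) (f : α → Int) (b : α) (m : Int)
    (hb : m ≤ f b) (hmin : ∀ x ∈ t, m ≤ f x) (hmem : f b = m ∨ ∃ x ∈ t, f x = m) :
    List.foldl (minStep f) (some b) t =
    (if f b = m then some b else t.find? (fun x => f x == m)) := by
  induction t generalizing b with
  | nil =>
    rcases hmem with h | h
    · simp [h]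
    · simp at h
  | cons x t ih =>
    simp only [List.foldl_cons, minStep]
    by_cases hbm : f b = m
    · have hx : ¬ f x < f b := by
        have := hmin x (List.mem_cons_self); omega
      rw [if_neg hx]
      rw [ih b hb (fun y hy => hmin y (List.mem_cons_of_mem _ hy)) (Or.inl hbm)]
      simp [hbm]
    · rw [if_neg hbm]
      by_cases hxm : f x = m
      · have hx : f x < f b := by
          have h1 : m ≤ f b := hb; omega
        rw [if_pos hx]
        rw [ih x (le_of_eq hxm.symm) (fun y hy => hmin y (List.mem_cons_of_mem _ hy)) (Or.inl hxm)]
        simp [hxm]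
      · have hmem' : ∃ y ∈ t, f y = m := by
          rcases hmem with h | ⟨y, hy, hfy⟩
          · exact absurd h hbm
          · rcases List.mem_cons.mp hy with h1 | h1
            · exact absurd (h1 ▸ hfy) hxm
            · exact ⟨y, h1, hfy⟩
        have hfind : (x :: t).find? (fun y => f y == m) = t.find? (fun y => f y == m) := by
          simp only [List.find?_cons]
          rw [(by simpa using hxm : (f x == m) = false)]
        rw [hfind]
        by_cases hx : f x < f b
        · rw [if_pos hx]
          rw [ih x (hmin x (List.mem_cons_self)) (fun y hy => hmin y (List.mem_cons_of_mem _ hy)) (Or.inr hmem')]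
          rw [if_neg hxm]
        · rw [if_neg hx]
          rw [ih b hb (fun y hy => hmin y (List.mem_cons_of_mem _ hy)) (Or.inr hmem')]
          rw [if_neg hbm]

theorem min?_eq_foldl_minStep {α : Type} (xs : List α) (f : α → Int) :
    PySem.List.min? xs f = List.foldl (minStep f) none xs := rfl

theorem min?_eq_find? {α : Type} (xs : List α) (f : α → Int) (m : Int)
    (hmem : ∃ x ∈ xs, f x = m) (hmin : ∀ x ∈ xs, m ≤ f x) :
    PySem.List.min? xs f = xs.find? (fun x => f x == m) := by
  rw [min?_eq_foldl_minStep]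
  cases xs with
  | nil => simp at hmem
  | cons a t =>
    simp only [List.foldl_cons, minStep]
    rw [foldl_min_find t f a m (hmin a (List.mem_cons_self))
      (fun y hy => hmin y (List.mem_cons_of_mem _ hy))
      (by rcases hmem with ⟨x, hx, hfx⟩
          rcases List.mem_cons.mp hx with h | h
          · exact Or.inl (h ▸ hfx)
          · exact Or.inr ⟨x, h, hfx⟩)]
    by_cases ham : f a = m
    · simp [ham]
    · rw [if_neg ham]
      simp only [List.find?_cons]
      rw [(by simpa using ham : (f a == m) = false)]

theorem rmA_loop_eq_find (d : List (String × Int)) (m : Int) (ks : List String) :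
    rmA_loop d m ks =
      match ks.find? (fun x => List.lookup x d == some m) with
      | some x => d.eraseP (fun p => p.1 == x)
      | none => d := by
  induction ks with
  | nil => rfl
  | cons x rest ih =>
    by_cases h : (List.lookup x d == some m) = true
    · simp [rmA_loop, h]
    · have h' : (List.lookup x d == some m) = false := by simpa using h
      simp [rmA_loop, h', ih]

-- under Nodup keys, the key-level searches both find the key of the first pair with value m
theorem keyfind (d : List (String × Int)) (hnd : (d.map Prod.fst).Nodup) (m : Int) :
    (d.map Prod.fst).find? (fun x => List.lookup x d == some m) =
      (d.find? (fun p => p.2 == m)).map Prod.fst := by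
  induction d with
  | nil => rfl
  | cons a t ih =>
    simp only [List.map_cons, List.nodup_cons] at hnd
    simp only [List.map_cons, List.find?_cons]
    by_cases hm : a.2 = m
    · rw [show (List.lookup a.1 (a :: t) == some m) = true by simp [List.lookup, hm]]
      rw [show (a.2 == m) = true by simp [hm]]
      rfl
    · rw [show (List.lookup a.1 (a :: t) == some m) = false by simp [List.lookup, hm]]
      rw [show (a.2 == m) = false by simp [hm]]
      rw [find?_congr' (t.map Prod.fst) _ (fun x => List.lookup x t == some m)
        (by intro x hx
            have hxe : (x == a.1) = false := by
              refine beq_eq_false_iff_ne.mpr (fun he => ?_)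
              rw [he] at hx
              exact hnd.1 hx
            simp [List.lookup, hxe])]
      exact ih hnd.2

theorem valfind (d : List (String × Int)) (hnd : (d.map Prod.fst).Nodup) (m : Int) :
    (d.map Prod.fst).find? (fun x => (List.lookup x d).getD 0 == m) =
      (d.find? (fun p => p.2 == m)).map Prod.fst := by
  rw [← keyfind d hnd m]
  apply find?_congr'
  intro x hx
  rcases lookup_exists_of_mem_keys hx with ⟨v, hv, _⟩
  simp [hv]

-- ===== VERDICT (by name: the statement is the Claim_ definition above) =====
theorem rm_smallest_spec : Claim_equal_rm_smallest := by
  intro d _ hnd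
  unfold Spec_rm_smallest rm_smallest rm_smallest_alt
  cases d with
  | nil => rfl
  | cons a t =>
    rw [if_neg (by simp)]
    rcases hs : PySem.List.sorted ((a :: t).map Prod.snd) (fun v => v) with _ | ⟨m, srest⟩
    · exfalso
      have hl := (PySem.List.sorted_perm ((a :: t).map Prod.snd) (fun v => v) false).length_eq
      rw [hs] at hl
      simp at hl
    · have hle : ∀ v ∈ (a :: t).map Prod.snd, m ≤ v :=
        PySem.List.key_head_sorted_le ((a :: t).map Prod.snd) (fun v => v) hs
      have hmemv : m ∈ (a :: t).map Prod.snd :=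
        (PySem.List.sorted_perm ((a :: t).map Prod.snd) (fun v => v) false).mem_iff.mp
          (by rw [hs]; exact List.mem_cons_self)
      set D := a :: t with hD
      have hminf : ∀ x ∈ D.map Prod.fst, m ≤ (List.lookup x D).getD 0 := by
        intro x hx
        rcases lookup_exists_of_mem_keys hx with ⟨v, hv, hm⟩
        rw [hv]
        exact hle v (List.mem_map.mpr ⟨(x, v), hm, rfl⟩)
      have hmemf : ∃ x ∈ D.map Prod.fst, (List.lookup x D).getD 0 = m := by
        rcases List.mem_map.mp hmemv with ⟨p, hp, hpv⟩
        refine ⟨p.1, List.mem_map.mpr ⟨p, hp, rfl⟩, ?_⟩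
        rw [lookup_of_mem_nodup hnd hp]
        simpa using hpv
      show rmA_loop D m (D.map Prod.fst) = _
      rw [rmA_loop_eq_find D m (D.map Prod.fst), keyfind D hnd m,
          min?_eq_find? (D.map Prod.fst) _ m hmemf hminf, valfind D hnd m]
      cases D.find? (fun p => p.2 == m) <;> rfl
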